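-- pv_equiv track=rewrite | github.com/ritesh30gupta06/Synapse-tasks- | 1.Pikachu.py | strongest_team
-- ===== SOURCE A (Python) =====
-- from itertools import combinations
--
-- def strongest_team(pokedex, k):
--     max_types = 0
--     best_teams = []
--
--     # Try all possible combinations of k pokemons
--     for team in combinations(pokedex.keys(), k):
--         combined_types = set()
--         for pokemon in team:
--             combined_types.update(pokedex[pokemon])
--
--         # Count distinct types
--         type_count = len(combined_types)
--
--         # Update strongest team
--         if type_count > max_types:
--             max_types = type_count
--             best_teams = [(team, combined_types)]
--         elif type_count == max_types:
--             best_teams.append((team, combined_types))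
--
--     return best_teams, max_types
-- ===== SOURCE B (Python) =====
-- def strongest_team(pokedex, k):
--     # Backtracking DFS: extend a partial team name by name, carrying the combined
--     # type set down the recursion (each union is computed once per tree node and
--     # shared by all teams with that prefix), pruning branches that cannot reach
--     # size k.  Teams come out in index-lexicographic order; a second pass keeps
--     # the ones with the most types.
--     results = []
--
--     def extend(remaining, team, types):
--         if len(team) == k:
--             results.append((team, types, len(types)))
--         elif len(remaining) >= k - len(team):
--             name, *rest = remaining
--             extend(rest, team + (name,), types | set(pokedex[name]))
--             extend(rest, team, types)
--
--     extend(list(pokedex), (), set())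
--     max_types = max((c for _, _, c in results), default=0)
--     return [(t, s) for t, s, c in results if c == max_types], max_types
-- ===== Notes on version B (the rewrite author's own statement) =====
-- stated objective: alternative
-- what changed: B replaces A's enumerate-all-k-combinations-and-union-each-team-from-scratch loop with a pruned backtracking DFS that extends a partial team name by name, carrying the accumulated type set down the recursion so each union step is shared by all teams with that prefix, then picks the maximal teams in a separate max+filter pass instead of A's running-maximum with reset/append branches.
import Mathlib
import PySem

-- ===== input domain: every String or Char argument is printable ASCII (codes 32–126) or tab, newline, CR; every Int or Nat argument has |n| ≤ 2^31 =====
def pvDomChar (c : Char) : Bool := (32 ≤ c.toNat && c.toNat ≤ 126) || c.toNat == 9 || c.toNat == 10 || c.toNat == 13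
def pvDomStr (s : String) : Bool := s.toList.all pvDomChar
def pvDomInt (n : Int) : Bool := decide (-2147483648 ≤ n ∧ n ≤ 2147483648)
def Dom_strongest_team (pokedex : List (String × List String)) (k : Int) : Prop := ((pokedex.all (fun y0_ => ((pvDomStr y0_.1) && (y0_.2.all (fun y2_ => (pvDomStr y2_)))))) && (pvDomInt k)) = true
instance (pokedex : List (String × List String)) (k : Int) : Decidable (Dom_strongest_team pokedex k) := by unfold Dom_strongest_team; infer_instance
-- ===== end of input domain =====

-- B replaces A's combinations-then-union-each-team loop by a pruned backtracking DFS
-- that carries the accumulated type set down the recursion, followed by a max+filter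
-- pass; equivalence of the RETURN value is proved for every k ≥ 0 (both Pythons raise
-- ValueError for k < 0 — excluded by Pre_).

-- ===== PORT A =====
-- A iterates itertools.combinations(pokedex.keys(), k) keeping a running (max_types, best_teams);
-- combinations is ported by the prelude's PySem.List.combinations; dict → PySem.Dict.ofList.
def strongest_team (pokedex : List (String × List String)) (k : Int) : (List (List String × List String)) × Int :=
  let d := PySem.Dict.ofList pokedex
  let r := (PySem.List.combinations d.keys k.toNat).foldl
    (fun (st : Int × List (List String × List String)) team =>
      let combined := team.foldl (fun s p => PySem.Set.update s (d.getD p [])) PySem.Set.empty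
      let type_count : Int := (PySem.Set.len combined : Int)
      if st.1 < type_count then (type_count, [(team, combined)])
      else if type_count = st.1 then (st.1, st.2 ++ [(team, combined)])
      else st) (0, [])
  (r.2, r.1)

-- ===== PORT B =====
-- Source B's nested 'extend': the mutable results list is the threaded accumulator; the
-- Python 'name, *rest = remaining' on an empty list raises ValueError, which is only
-- reachable for k < 0 (outside Pre_) — the [] arm merely totalizes the match there.
def pvExtendB (d : PySem.Dict String (List String)) (k : Int) :
    List String → List String → PySem.Set String →
    List (List String × PySem.Set String × Int) → List (List String × PySem.Set String × Int)
  | remaining, team, types, results =>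
    if (team.length : Int) = k then
      results ++ [(team, types, (PySem.Set.len types : Int))]
    else if k - (team.length : Int) ≤ (remaining.length : Int) then
      match remaining with
      | [] => results
      | name :: rest =>
          pvExtendB d k rest team types
            (pvExtendB d k rest (team ++ [name]) (PySem.Set.union types (d.getD name [])) results)
    else results
termination_by remaining => remaining.length

def strongest_team_alt (pokedex : List (String × List String)) (k : Int) : (List (List String × List String)) × Int :=
  let d := PySem.Dict.ofList pokedex
  let results := pvExtendB d k d.keys [] PySem.Set.empty []
  let max_types := PySem.List.maxD (results.map (fun r => r.2.2)) (fun x => x) 0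
  ((results.filter (fun r => r.2.2 = max_types)).map (fun r => (r.1, r.2.1)), max_types)

-- ===== PRECONDITION & SPEC =====
-- Both Pythons raise ValueError for negative k: exactly those inputs are excluded.
def Pre_strongest_team (pokedex : List (String × List String)) (k : Int) : Prop := 0 ≤ k
instance (pokedex : List (String × List String)) (k : Int) : Decidable (Pre_strongest_team pokedex k) := by unfold Pre_strongest_team; infer_instance
def pvWitness_strongest_team : (List (String × List String)) × Int :=
  ([("pikachu", ["electric"]), ("bulbasaur", ["grass", "poison"])], 1)

def Spec_strongest_team (pokedex : List (String × List String)) (k : Int) (out : (List (List String × List String)) × Int) : Prop := out = strongest_team_alt pokedex k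
instance (pokedex : List (String × List String)) (k : Int) (out : (List (List String × List String)) × Int) : Decidable (Spec_strongest_team pokedex k out) := by unfold Spec_strongest_team; infer_instance

-- ===== CLAIM =====
def Claim_equal_strongest_team : Prop := ∀ (pokedex : List (String × List String)) (k : Int), Dom_strongest_team pokedex k → Pre_strongest_team pokedex k → Spec_strongest_team pokedex k (strongest_team pokedex k)

-- ===== LEMMAS AND PROOFS =====

-- B's DFS, characterised: starting from a partial team needing n more members, it appends
-- to results exactly the n-combinations of the remaining names, each paired with the
-- type set obtained by folding the carried set forward — in combination order.
theorem pvExtendB_eq (d : PySem.Dict String (List String)) (k : Int)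
    (remaining : List String) (team : List String) (types : PySem.Set String)
    (results : List (List String × PySem.Set String × Int)) (n : Nat)
    (hn : k - (team.length : Int) = (n : Int)) :
    pvExtendB d k remaining team types results
      = results ++ (PySem.List.combinations remaining n).map
          (fun c =>
            let u := c.foldl (fun s p => PySem.Set.update s (d.getD p [])) types
            (team ++ c, u, (PySem.Set.len u : Int))) := by
  induction remaining generalizing team types results n with
  | nil =>
    rw [pvExtendB]
    cases n with
    | zero =>
      have h0 : (team.length : Int) = k := by omega
      simp [h0, PySem.List.combinations_zero]
    | succ s =>
      have h0 : ¬ ((team.length : Int) = k) := by omega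
      have h1 : ¬ (k - (team.length : Int) ≤ (([] : List String).length : Int)) := by
        simp only [List.length_nil, Int.natCast_zero]; omega
      rw [if_neg h0, if_neg h1, PySem.List.combinations_nil_succ]
      simp
  | cons name rest ih =>
    rw [pvExtendB]
    cases n with
    | zero =>
      have h0 : (team.length : Int) = k := by omega
      simp [h0, PySem.List.combinations_zero]
    | succ s =>
      have h0 : ¬ ((team.length : Int) = k) := by omega
      rw [if_neg h0]
      by_cases h1 : k - (team.length : Int) ≤ ((name :: rest).length : Int)
      · rw [if_pos h1]
        have hinner : k - ((team ++ [name]).length : Int) = (s : Int) := by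
          simp only [List.length_append, List.length_cons, List.length_nil]
          push_cast; omega
        rw [ih _ _ _ s hinner, ih _ _ _ (s + 1) hn,
          PySem.List.combinations_cons_succ, List.map_append, List.append_assoc,
          List.map_map]
        congr 2
        apply List.map_congr_left
        intro c _
        simp only [Function.comp_apply, List.foldl_cons, List.append_assoc,
          List.singleton_append]
        rfl
      · rw [if_neg h1]
        have hlen : (name :: rest).length < s + 1 := by
          simp only [List.length_cons] at h1 ⊢
          omega
        rw [PySem.List.combinations_eq_nil_of_length_lt _ hlen]
        simp

-- A's running-maximum fold, in one shot: its final maximum is the running max of the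
-- weights, and its final list is the (possibly restarted) collection of maximal elements.
theorem pvFoldA_eq {α : Type} (w : α → Int) (l : List α) (m : Int) (b : List α) :
    l.foldl (fun (st : Int × List α) x =>
        if st.1 < w x then (w x, [x])
        else if w x = st.1 then (st.1, st.2 ++ [x])
        else st) (m, b)
      = (l.foldl (fun a x => max a (w x)) m,
         (if l.foldl (fun a x => max a (w x)) m = m then b else []) ++
           l.filter (fun x => decide (w x = l.foldl (fun a x => max a (w x)) m))) := by
  induction l generalizing m b with
  | nil => simp
  | cons x t ih =>
    have hle : ∀ a : Int, a ≤ t.foldl (fun a x => max a (w x)) a :=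
      fun a => (PySem.List.le_foldl_max_int t w a).1
    simp only [List.foldl_cons]
    by_cases h1 : m < w x
    · have hMge := hle (w x)
      rw [if_pos h1, ih]
      have e1 : max m (w x) = w x := max_eq_right (le_of_lt h1)
      simp only [e1]
      have e2 : ¬ (t.foldl (fun a x => max a (w x)) (w x) = m) := by omega
      rw [if_neg e2, List.nil_append]
      by_cases h2 : t.foldl (fun a x => max a (w x)) (w x) = w x
      · have e4 : decide (w x = t.foldl (fun a x => max a (w x)) (w x)) = true :=
          decide_eq_true h2.symm
        simp [h2]
      · have e4 : decide (w x = t.foldl (fun a x => max a (w x)) (w x)) = false :=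
          decide_eq_false (fun h => h2 h.symm)
        simp [e4, h2]
    · have e1 : max m (w x) = m := max_eq_left (by omega)
      rw [if_neg h1]
      by_cases h2 : w x = m
      · rw [if_pos h2, ih]
        simp only [e1]
        by_cases h3 : t.foldl (fun a x => max a (w x)) m = m
        · have e4 : decide (w x = t.foldl (fun a x => max a (w x)) m) = true :=
            decide_eq_true (h2.trans h3.symm)
          simp [h3, h2]
        · have e4 : decide (w x = t.foldl (fun a x => max a (w x)) m) = false :=
            decide_eq_false (by rw [h2]; exact fun h => h3 h.symm)
          simp [e4, h3]
      · rw [if_neg h2, ih]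
        simp only [e1]
        have e4 : decide (w x = t.foldl (fun a x => max a (w x)) m) = false :=
          decide_eq_false (by have := hle m; omega)
        simp [e4]

-- max(counts, default=0) is the running max from 0 when all counts are nonnegative.
theorem pvMaxD_eq (l : List Int) (hl : ∀ x ∈ l, 0 ≤ x) :
    PySem.List.maxD l (fun x => x) 0 = l.foldl (fun a x => max a x) 0 := by
  cases l with
  | nil => simp [PySem.List.maxD, PySem.List.max?]
  | cons x t =>
    rw [PySem.List.maxD, PySem.List.max?_id_cons, Option.getD_some, List.foldl_cons,
      max_eq_right (hl x (by simp))]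

-- the whole agreement, stated on the marshalled dictionary (zeta-reduced forms of both ports).
theorem pvMain (d : PySem.Dict String (List String)) (k : Int) (hk : 0 ≤ k) :
    (((PySem.List.combinations d.keys k.toNat).foldl
      (fun (st : Int × List (List String × List String)) team =>
        let combined := team.foldl (fun s p => PySem.Set.update s (d.getD p [])) PySem.Set.empty
        let type_count : Int := (PySem.Set.len combined : Int)
        if st.1 < type_count then (type_count, [(team, combined)])
        else if type_count = st.1 then (st.1, st.2 ++ [(team, combined)])
        else st) (0, [])).2,
     ((PySem.List.combinations d.keys k.toNat).foldl
      (fun (st : Int × List (List String × List String)) team =>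
        let combined := team.foldl (fun s p => PySem.Set.update s (d.getD p [])) PySem.Set.empty
        let type_count : Int := (PySem.Set.len combined : Int)
        if st.1 < type_count then (type_count, [(team, combined)])
        else if type_count = st.1 then (st.1, st.2 ++ [(team, combined)])
        else st) (0, [])).1)
    =
    (let results := pvExtendB d k d.keys [] PySem.Set.empty []
     let max_types := PySem.List.maxD (results.map (fun r => r.2.2)) (fun x => x) 0
     ((results.filter (fun r => r.2.2 = max_types)).map (fun r => (r.1, r.2.1)), max_types)) := by
  have hres : pvExtendB d k d.keys [] PySem.Set.empty []
      = (PySem.List.combinations d.keys k.toNat).map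
          (fun c =>
            let u := c.foldl (fun s p => PySem.Set.update s (d.getD p [])) PySem.Set.empty
            (c, u, (PySem.Set.len u : Int))) := by
    rw [pvExtendB_eq d k d.keys [] PySem.Set.empty [] k.toNat
      (by simp only [List.length_nil, Int.natCast_zero]; omega)]
    simp
  simp only [hres]
  set U := fun (team : List String) =>
    team.foldl (fun s p => PySem.Set.update s (d.getD p [])) PySem.Set.empty with hU
  set c2 := (PySem.List.combinations d.keys k.toNat).map (fun team => (team, U team)) with hc2
  -- the candidate triples are the candidate pairs with their weight attached
  have htri : (PySem.List.combinations d.keys k.toNat).map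
      (fun c =>
        let u := c.foldl (fun s p => PySem.Set.update s (d.getD p [])) PySem.Set.empty
        (c, u, (PySem.Set.len u : Int)))
      = c2.map (fun p => (p.1, p.2, (PySem.Set.len p.2 : Int))) := by
    rw [hc2, List.map_map]; rfl
  -- A's fold is the same fold over the candidate pairs
  have hfoldA : (PySem.List.combinations d.keys k.toNat).foldl
      (fun (st : Int × List (List String × List String)) team =>
        let combined := team.foldl (fun s p => PySem.Set.update s (d.getD p [])) PySem.Set.empty
        let type_count : Int := (PySem.Set.len combined : Int)
        if st.1 < type_count then (type_count, [(team, combined)])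
        else if type_count = st.1 then (st.1, st.2 ++ [(team, combined)])
        else st) (0, [])
      = c2.foldl
          (fun (st : Int × List (List String × List String)) p =>
            if st.1 < (PySem.Set.len p.2 : Int) then ((PySem.Set.len p.2 : Int), [p])
            else if (PySem.Set.len p.2 : Int) = st.1 then (st.1, st.2 ++ [p])
            else st) (0, []) := by
    rw [hc2, List.foldl_map]
  rw [hfoldA, pvFoldA_eq (fun p => (PySem.Set.len p.2 : Int)) c2 0 []]
  -- B's maximum is the same running maximum
  have hw : (c2.map (fun p => (p.1, p.2, (PySem.Set.len p.2 : Int)))).map (fun r => r.2.2)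
      = c2.map (fun p => (PySem.Set.len p.2 : Int)) := by
    rw [List.map_map]; rfl
  have hmax : PySem.List.maxD
      ((c2.map (fun p => (p.1, p.2, (PySem.Set.len p.2 : Int)))).map (fun r => r.2.2))
      (fun x => x) 0
      = c2.foldl (fun a p => max a (PySem.Set.len p.2 : Int)) 0 := by
    rw [hw, pvMaxD_eq, List.foldl_map]
    intro x hx
    simp only [List.mem_map] at hx
    obtain ⟨p, _, rfl⟩ := hx
    exact Int.natCast_nonneg _
  -- B's filter-then-project is A's filter over the pairs
  have hfil : ∀ M : Int,
      ((c2.map (fun p => (p.1, p.2, (PySem.Set.len p.2 : Int)))).filter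
          (fun r => r.2.2 = M)).map (fun r => (r.1, r.2.1))
        = c2.filter (fun p => decide ((PySem.Set.len p.2 : Int) = M)) := by
    intro M
    rw [List.filter_map, List.map_map]
    have : ((fun (r : List String × PySem.Set String × Int) => (r.1, r.2.1)) ∘
        (fun (p : List String × PySem.Set String) => (p.1, p.2, (PySem.Set.len p.2 : Int))))
        = fun p => p := rfl
    rw [this, List.map_id']
    rfl
  simp only [htri, hmax, hfil, ite_self, List.nil_append]

-- ===== VERDICT =====
theorem strongest_team_spec : Claim_equal_strongest_team := by
  intro pokedex k _ hk
  exact pvMain (PySem.Dict.ofList pokedex) k hk
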